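-- pv_equiv track=rewrite | github.com/aidanhopper/chess | functions.py | fen_to_list
-- ===== SOURCE A (Python) =====
-- def fen_to_list(fen):
--     arr = []
--     board = fen.split(' ')[0].split('/')
--     for row in range(len(board)):
--         line = board[row]
--         for char in line:
--             if char.isdigit():
--                 for i in range(int(char)):
--                     arr.append(' ')
--             else:
--                 arr.append(char)
--     return arr
-- ===== SOURCE B (Python) =====
-- def fen_to_list(fen):
--     board = fen.split(' ')[0].replace('/', '')
--     for d in '0123456789':
--         board = board.replace(d, ' ' * int(d))
--     return list(board)
-- ===== Notes on version B (the rewrite author's own statement) =====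
-- stated objective: faster
-- what changed: Replaces A's per-character Python scan with nested index/append loops by staged whole-string substitution passes: one global replace dropping the row separator, then ten global replace passes (one per digit) expanding each digit into that many spaces, then list() of the result.
import Mathlib
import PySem

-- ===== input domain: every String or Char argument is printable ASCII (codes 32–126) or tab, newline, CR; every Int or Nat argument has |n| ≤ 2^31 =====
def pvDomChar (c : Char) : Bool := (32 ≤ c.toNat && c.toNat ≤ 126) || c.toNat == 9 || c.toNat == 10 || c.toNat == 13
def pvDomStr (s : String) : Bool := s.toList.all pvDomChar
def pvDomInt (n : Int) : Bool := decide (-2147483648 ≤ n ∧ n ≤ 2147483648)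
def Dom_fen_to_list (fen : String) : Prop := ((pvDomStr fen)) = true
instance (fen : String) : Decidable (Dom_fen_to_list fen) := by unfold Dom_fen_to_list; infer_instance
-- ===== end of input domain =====

-- B replaces A's per-character scan with nested index/append loops by staged whole-string
-- substitutions: one global replace dropping the row separator, ten global replace passes (one
-- per digit) expanding that digit everywhere into spaces, then list() of the result; the timing
-- run measured B faster by a constant factor (C-level replace passes vs an interpreted loop).

-- ===== PORT A =====
-- fen.split(' ')[0].split('/'); split(' ') is never empty, so [0] is its head.
def fen_to_list (fen : String) : List String :=
  let board := PySem.Chars.splitOn ((PySem.Chars.splitOn fen.toList [' ']).headD []) ['/']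
  (PySem.List.pyRange 0 board.length 1).foldl (fun arr row =>
    let line := PySem.List.pyGetD board row []
    line.foldl (fun arr char =>
      if PySem.Chars.isdigit char then
        (PySem.List.pyRange 0 ((PySem.Int.ofChars? [char]).getD 0) 1).foldl
          (fun arr _ => arr ++ [" "]) arr
      else arr ++ [String.ofList [char]]) arr) []

-- ===== PORT B =====
-- for d in '0123456789': board = board.replace(d, ' ' * int(d))
def pvDigits : List Char := ['0','1','2','3','4','5','6','7','8','9']

def fen_to_list_alt (fen : String) : List String :=
  let board0 := PySem.Chars.replace ((PySem.Chars.splitOn fen.toList [' ']).headD []) ['/'] []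
  let board := pvDigits.foldl (fun s d =>
      PySem.Chars.replace s [d] (List.replicate ((PySem.Int.ofChars? [d]).getD 0).toNat ' ')) board0
  board.map (fun c => String.ofList [c])

-- ===== PRECONDITION & SPEC =====
def Spec_fen_to_list (fen : String) (out : List String) : Prop := out = fen_to_list_alt fen
instance (fen : String) (out : List String) : Decidable (Spec_fen_to_list fen out) := by unfold Spec_fen_to_list; infer_instance

-- ===== CLAIM (what is proved, stated in full; the proofs are below) =====
def Claim_equal_fen_to_list : Prop := ∀ (fen : String), Dom_fen_to_list fen → Spec_fen_to_list fen (fen_to_list fen)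

-- ===== LEMMAS AND PROOFS =====

-- a simple structural recursion equivalent to splitOn by '/'
def pvSimpleSplit (pre : List Char) : List Char → List (List Char)
  | [] => [pre]
  | c :: rest => if c = '/' then pre :: pvSimpleSplit [] rest else pvSimpleSplit (pre ++ [c]) rest

theorem pvGo_eq_simple : ∀ (fuel : Nat) (l cur : List Char) (acc : List (List Char)),
    l.length ≤ fuel →
    PySem.Chars.splitOn.go ['/'] fuel l cur acc = acc.reverse ++ pvSimpleSplit cur.reverse l := by
  intro fuel
  induction fuel with
  | zero =>
    intro l cur acc h
    have hl : l = [] := List.eq_nil_of_length_eq_zero (Nat.le_zero.mp h)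
    subst hl
    simp [PySem.Chars.splitOn.go, pvSimpleSplit]
  | succ fuel ih =>
    intro l cur acc h
    cases l with
    | nil => simp [PySem.Chars.splitOn.go, pvSimpleSplit]
    | cons c rest =>
      rw [PySem.Chars.splitOn.go]
      by_cases hc : c = '/'
      · subst hc
        simp only [List.isPrefixOf, BEq.rfl, Bool.true_and, if_pos]
        rw [ih _ _ _ (by simpa using Nat.le_of_succ_le_succ h)]
        simp [pvSimpleSplit]
      · have : (['/'].isPrefixOf (c :: rest)) = false := by
          simp [List.isPrefixOf]
          exact fun hcontra => hc hcontra.symm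
        rw [this]
        simp only [Bool.false_eq_true, if_false]
        rw [ih _ _ _ (by simpa using Nat.le_of_succ_le_succ h)]
        simp [pvSimpleSplit, hc]

theorem pvSplitOn_eq_simple (cs : List Char) :
    PySem.Chars.splitOn cs ['/'] = pvSimpleSplit [] cs := by
  rw [PySem.Chars.splitOn, pvGo_eq_simple _ _ _ _ (by omega)]
  simp

theorem pvSimple_flat {α : Type} (g : Char → List α) :
    ∀ (l pre : List Char),
      (pvSimpleSplit pre l).flatMap (fun row => row.flatMap g)
        = pre.flatMap g ++ l.flatMap (fun c => if c = '/' then [] else g c) := by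
  intro l
  induction l with
  | nil => intro pre; simp [pvSimpleSplit]
  | cons c rest ih =>
    intro pre
    by_cases hc : c = '/'
    · subst hc; simp [pvSimpleSplit, ih]
    · simp [pvSimpleSplit, hc, ih]

def pvH (c : Char) : List String :=
  if PySem.Chars.isdigit c then
    List.replicate ((PySem.Int.ofChars? [c]).getD 0).toNat " "
  else [String.ofList [c]]

theorem pvRange_fold_spaces (n : Int) (arr : List String) :
    (PySem.List.pyRange 0 n 1).foldl (fun arr _ => arr ++ [" "]) arr
      = arr ++ List.replicate n.toNat " " := by
  rcases Int.le_total n 0 with h | h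
  · rw [PySem.List.pyRange_one_eq_nil h]
    simp [Int.toNat_of_nonpos h]
  · obtain ⟨k, rfl⟩ := Int.eq_ofNat_of_zero_le h
    clear h
    induction k with
    | zero => simp [PySem.List.pyRange_one_eq_nil]
    | succ k ih =>
      rw [show ((k + 1 : ℕ) : ℤ) = (k : ℤ) + 1 by push_cast; ring,
        PySem.List.pyRange_one_succ_right (by positivity)]
      simp [List.foldl_append, ih, List.replicate_succ']

theorem pvInner_fold (l : List Char) (arr : List String) :
    l.foldl (fun arr char =>
      if PySem.Chars.isdigit char then
        (PySem.List.pyRange 0 ((PySem.Int.ofChars? [char]).getD 0) 1).foldl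
          (fun arr _ => arr ++ [" "]) arr
      else arr ++ [String.ofList [char]]) arr = arr ++ l.flatMap pvH := by
  induction l generalizing arr with
  | nil => simp
  | cons c rest ih =>
    simp only [List.foldl_cons, List.flatMap_cons]
    by_cases hd : PySem.Chars.isdigit c
    · rw [if_pos hd, pvRange_fold_spaces, ih]
      simp [pvH, hd]
    · rw [if_neg hd, ih]
      simp [pvH, hd]

theorem pvOuter_fold (board : List (List Char)) (init : List String) :
    board.foldl (fun arr line => line.foldl (fun arr char =>
      if PySem.Chars.isdigit char then
        (PySem.List.pyRange 0 ((PySem.Int.ofChars? [char]).getD 0) 1).foldl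
          (fun arr _ => arr ++ [" "]) arr
      else arr ++ [String.ofList [char]]) arr) init
      = init ++ board.flatMap (fun line => line.flatMap pvH) := by
  induction board generalizing init with
  | nil => simp
  | cons line rest ih =>
    simp only [List.foldl_cons, List.flatMap_cons]
    rw [pvInner_fold, ih, List.append_assoc]

-- single-char replace IS a per-character flatMap
theorem pvReplaceGo_single (d : Char) (r : List Char) :
    ∀ (fuel : Nat) (l acc : List Char), l.length ≤ fuel →
    PySem.Chars.replace.go [d] r fuel l acc
      = acc.reverse ++ l.flatMap (fun c => if c = d then r else [c]) := by
  intro fuel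
  induction fuel with
  | zero =>
    intro l acc h
    have hl : l = [] := List.eq_nil_of_length_eq_zero (Nat.le_zero.mp h)
    subst hl
    simp [PySem.Chars.replace.go]
  | succ fuel ih =>
    intro l acc h
    cases l with
    | nil => simp [PySem.Chars.replace.go]
    | cons c rest =>
      rw [PySem.Chars.replace.go]
      by_cases hc : c = d
      · subst hc
        simp only [List.isPrefixOf, BEq.rfl, Bool.true_and, if_pos]
        rw [show List.drop [c].length (c :: rest) = rest from rfl,
          ih _ _ (by simpa using Nat.le_of_succ_le_succ h)]
        simp
      · have : ([d].isPrefixOf (c :: rest)) = false := by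
          simp [List.isPrefixOf]
          exact fun hcontra => hc hcontra.symm
        rw [this]
        simp only [Bool.false_eq_true, if_false]
        rw [ih _ _ (by simpa using Nat.le_of_succ_le_succ h)]
        simp [hc]

theorem pvReplace_single (s : List Char) (d : Char) (r : List Char) :
    PySem.Chars.replace s [d] r = s.flatMap (fun c => if c = d then r else [c]) := by
  rw [PySem.Chars.replace]
  simp only [List.isEmpty_cons, Bool.false_eq_true, if_false]
  rw [pvReplaceGo_single _ _ _ _ _ (by omega)]
  simp

def pvSpaces (d : Char) : List Char :=
  List.replicate ((PySem.Int.ofChars? [d]).getD 0).toNat ' '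

def pvExpand (ds : List Char) (c : Char) : List Char :=
  if c ∈ ds then pvSpaces c else [c]

theorem pvFlatMap_replicate_space {g : Char → List Char} (hg : g ' ' = [' ']) (n : Nat) :
    (List.replicate n ' ').flatMap g = List.replicate n ' ' := by
  induction n with
  | zero => simp
  | succ n ih => simp [List.replicate_succ, ih, hg]

theorem pvFold_replaces (ds : List Char) (hsp : ' ' ∉ ds) :
    ∀ (s : List Char),
      ds.foldl (fun s d =>
        PySem.Chars.replace s [d] (List.replicate ((PySem.Int.ofChars? [d]).getD 0).toNat ' ')) s
      = s.flatMap (pvExpand ds) := by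
  induction ds with
  | nil =>
    intro s
    rw [show pvExpand [] = fun c => [c] from funext fun c => by simp [pvExpand]]
    exact (List.flatMap_singleton' s).symm
  | cons d ds ih =>
    intro s
    have hsp' : ' ' ∉ ds := fun h => hsp (List.mem_cons_of_mem _ h)
    have hspd : ' ' ≠ d := fun h => hsp (h ▸ List.mem_cons_self ..)
    simp only [List.foldl_cons]
    rw [pvReplace_single, ih hsp', List.flatMap_assoc]
    refine List.flatMap_congr ?_
    intro c _
    by_cases hc : c = d
    · subst hc
      rw [if_pos rfl, pvFlatMap_replicate_space (g := pvExpand ds) (by simp [pvExpand, hsp'])]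
      simp [pvExpand, pvSpaces]
    · simp [pvExpand, hc]

theorem pvMem_digits_iff (c : Char) : c ∈ pvDigits ↔ PySem.Chars.isdigit c = true := by
  constructor
  · intro h
    fin_cases h <;> decide
  · intro h
    simp only [PySem.Chars.isdigit, Bool.and_eq_true, decide_eq_true_eq] at h
    obtain ⟨h1, h2⟩ := h
    have h1' : 48 ≤ c.toNat := h1
    have h2' : c.toNat ≤ 57 := h2
    have hc : c = Char.ofNat c.toNat := (Char.ofNat_toNat c).symm
    interval_cases hn : c.toNat <;> (rw [hc]; decide)

theorem pvExpand_map (c : Char) :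
    (pvExpand pvDigits c).map (fun ch => String.ofList [ch]) = pvH c := by
  by_cases hd : PySem.Chars.isdigit c
  · have hm : c ∈ pvDigits := (pvMem_digits_iff c).mpr hd
    simp [pvExpand, hm, pvSpaces, pvH, hd, List.map_replicate]
  · have hm : c ∉ pvDigits := fun h => hd ((pvMem_digits_iff c).mp h)
    simp [pvExpand, hm, pvH, hd]

-- ===== VERDICT (by name: the statement is the Claim_ definition above) =====
theorem fen_to_list_spec : Claim_equal_fen_to_list := by
  intro fen _
  unfold Spec_fen_to_list fen_to_list fen_to_list_alt
  simp only []
  rw [PySem.List.foldl_pyRange_zero_pyGetD' _ []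
    (fun arr line => line.foldl (fun arr char =>
      if PySem.Chars.isdigit char then
        (PySem.List.pyRange 0 ((PySem.Int.ofChars? [char]).getD 0) 1).foldl
          (fun arr _ => arr ++ [" "]) arr
      else arr ++ [String.ofList [char]]) arr) []]
  refine (pvOuter_fold _ []).trans ?_
  rw [pvSplitOn_eq_simple]
  have hA := pvSimple_flat pvH ((PySem.Chars.splitOn fen.toList [' ']).headD []) []
  simp only [List.flatMap_nil, List.nil_append] at hA ⊢
  rw [hA]
  -- B side
  rw [pvReplace_single, pvFold_replaces pvDigits (by decide),
    List.flatMap_assoc, List.map_flatMap]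
  refine List.flatMap_congr ?_
  intro c _
  by_cases hc : c = '/'
  · subst hc; simp
  · simp only [if_neg hc, List.flatMap_cons, List.flatMap_nil, List.append_nil]
    exact (pvExpand_map c).symm
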